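-- pv_equiv track=rewrite | github.com/aisuo258/CostEffectivenessAL | main.py | get_codelabel
-- ===== SOURCE A (Python) =====
-- def get_codelabel(poses,file_num):
--     codelabel={}
--     for i in range(file_num):
--         if i in poses:
--             codelabel[i]=1
--         else:
--             codelabel[i]=0
--     return codelabel
-- ===== SOURCE B (Python) =====
-- def get_codelabel(poses, file_num):
--     codelabel = dict.fromkeys(range(file_num), 0)
--     valid = range(file_num)
--     for p in poses:
--         if p in valid:
--             codelabel[p] = 1
--     return codelabel
-- ===== Notes on version B (the rewrite author's own statement) =====
-- stated objective: faster
-- what changed: Instead of scanning range(file_num) and doing a linear membership test `i in poses` per index, B builds an all-zeros dict over range(file_num) once and then overlays 1 at each in-range position of poses, so no per-index scan of poses remains.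
import Mathlib
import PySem

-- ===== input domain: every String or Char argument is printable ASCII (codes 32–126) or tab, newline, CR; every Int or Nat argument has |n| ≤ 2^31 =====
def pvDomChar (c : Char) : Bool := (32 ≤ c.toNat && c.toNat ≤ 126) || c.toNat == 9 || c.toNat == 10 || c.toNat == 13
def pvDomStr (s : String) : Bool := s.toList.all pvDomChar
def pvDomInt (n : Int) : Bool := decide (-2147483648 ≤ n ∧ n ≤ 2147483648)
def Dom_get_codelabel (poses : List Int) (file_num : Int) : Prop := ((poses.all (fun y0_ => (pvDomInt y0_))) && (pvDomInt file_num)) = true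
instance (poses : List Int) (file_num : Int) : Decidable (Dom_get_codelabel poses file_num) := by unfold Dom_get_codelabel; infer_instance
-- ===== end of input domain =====

-- B replaces A's per-index linear membership test over poses by building an all-zeros
-- dict over range(file_num) once and overlaying 1 at each in-range element of poses (faster).

-- ===== PORT A =====
-- for i in range(file_num): codelabel[i] = 1 if i in poses else 0
def get_codelabel (poses : List Int) (file_num : Int) : List (Int × Int) :=
  ((PySem.List.pyRange 0 file_num 1).foldl
      (fun d i => d.insert i (if poses.contains i then (1 : Int) else 0))
      PySem.Dict.empty).items

-- ===== PORT B =====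
-- codelabel = dict.fromkeys(range(file_num), 0); for p in poses: if p in range(file_num): codelabel[p] = 1
def get_codelabel_alt (poses : List Int) (file_num : Int) : List (Int × Int) :=
  let zeros : PySem.Dict Int Int :=
    (PySem.List.pyRange 0 file_num 1).foldl (fun d i => d.insert i 0) PySem.Dict.empty
  (poses.foldl (fun d p => if 0 ≤ p ∧ p < file_num then d.insert p 1 else d) zeros).items

-- ===== PRECONDITION & SPEC =====
def Spec_get_codelabel (poses : List Int) (file_num : Int) (out : List (Int × Int)) : Prop := out = get_codelabel_alt poses file_num
instance (poses : List Int) (file_num : Int) (out : List (Int × Int)) : Decidable (Spec_get_codelabel poses file_num out) := by unfold Spec_get_codelabel; infer_instance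

-- ===== CLAIM (what is proved, stated in full; the proofs are below) =====
def Claim_equal_get_codelabel : Prop := ∀ (poses : List Int) (file_num : Int), Dom_get_codelabel poses file_num → Spec_get_codelabel poses file_num (get_codelabel poses file_num)

-- ===== LEMMAS AND PROOFS =====

-- overlay pass: if every in-range key is already present, keys are unchanged and
-- lookups return 1 exactly at in-range members of ps
theorem pv_overlay (n : Int) (ps : List Int) (d : PySem.Dict Int Int)
    (hc : ∀ p, 0 ≤ p → p < n → d.contains p = true) :
    (ps.foldl (fun d p => if 0 ≤ p ∧ p < n then d.insert p 1 else d) d).keys = d.keys ∧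
    ∀ k, (ps.foldl (fun d p => if 0 ≤ p ∧ p < n then d.insert p 1 else d) d).get? k =
      if k ∈ ps ∧ 0 ≤ k ∧ k < n then some 1 else d.get? k := by
  induction ps generalizing d with
  | nil => simp
  | cons p ps ih =>
    by_cases hp : 0 ≤ p ∧ p < n
    · have hcontains : d.contains p = true := hc p hp.1 hp.2
      have hc' : ∀ q, 0 ≤ q → q < n → (d.insert p 1).contains q = true := by
        intro q h1 h2
        rw [PySem.Dict.contains_insert]
        simp [hc q h1 h2]
      obtain ⟨hk, hg⟩ := ih (d.insert p 1) hc'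
      refine ⟨?_, ?_⟩
      · simp only [List.foldl_cons, if_pos hp] at *
        rw [hk, PySem.Dict.keys_insert_of_contains d 1 hcontains]
      · intro k
        simp only [List.foldl_cons, if_pos hp]
        rw [hg k]
        by_cases hkps : k ∈ ps ∧ 0 ≤ k ∧ k < n
        · simp [hkps]
        · by_cases hkp : k = p
          · subst hkp
            simp [hp, PySem.Dict.get?_insert_self]
          · rw [if_neg hkps, PySem.Dict.get?_insert_of_ne _ _ hkp]
            by_cases hkr : 0 ≤ k ∧ k < n
            · have hnot : ¬ (k ∈ p :: ps ∧ 0 ≤ k ∧ k < n) := by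
                intro ⟨hmem, _⟩
                rcases List.mem_cons.mp hmem with h | h
                · exact hkp h
                · exact hkps ⟨h, hkr⟩
              rw [if_neg hnot]
            · have hnot : ¬ (k ∈ p :: ps ∧ 0 ≤ k ∧ k < n) := fun h => hkr h.2
              rw [if_neg hnot]
    · obtain ⟨hk, hg⟩ := ih d hc
      refine ⟨?_, ?_⟩
      · simpa [if_neg hp] using hk
      · intro k
        simp only [List.foldl_cons, if_neg hp]
        rw [hg k]
        by_cases hkps : k ∈ ps ∧ 0 ≤ k ∧ k < n
        · simp [hkps]
        · have h2 : ¬ (k ∈ p :: ps ∧ 0 ≤ k ∧ k < n) := by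
            intro ⟨hmem, hr⟩
            rcases List.mem_cons.mp hmem with h | h
            · subst h; exact hp hr
            · exact hkps ⟨h, hr⟩
          rw [if_neg hkps, if_neg h2]

-- items of a foldl-insert over the (fresh, distinct) keys of a range, from empty
theorem pv_items_range (n : Int) (v : Int → Int) :
    ((PySem.List.pyRange 0 n 1).foldl (fun d i => d.insert i (v i)) PySem.Dict.empty).items
      = (PySem.List.pyRange 0 n 1).map (fun i => (i, v i)) := by
  have h := PySem.Dict.items_foldl_insert_fresh (l := PySem.List.pyRange 0 n 1)
    (k := fun i => i) (v := v) (d := PySem.Dict.empty)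
    (by intro a _; simp [PySem.Dict.contains_empty])
    (by simpa using PySem.List.nodup_pyRange_one 0 n)
  simpa using h

-- ===== VERDICT (by name: the statement is the Claim_ definition above) =====
theorem get_codelabel_spec : Claim_equal_get_codelabel := by
  unfold Claim_equal_get_codelabel
  intro poses n _
  unfold Spec_get_codelabel get_codelabel get_codelabel_alt
  set zeros : PySem.Dict Int Int :=
    (PySem.List.pyRange 0 n 1).foldl (fun d i => d.insert i 0) PySem.Dict.empty with hz
  have hzitems : zeros.items = (PySem.List.pyRange 0 n 1).map (fun i => (i, (0:Int))) :=
    pv_items_range n (fun _ => 0)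
  have hzkeys : zeros.keys = PySem.List.pyRange 0 n 1 := by
    show zeros.items.map (·.1) = _
    rw [hzitems, List.map_map]
    exact List.map_id' _
  have hznodup : zeros.keys.Nodup := by
    rw [hzkeys]; exact PySem.List.nodup_pyRange_one 0 n
  have hzc : ∀ p, 0 ≤ p → p < n → zeros.contains p = true := by
    intro p h1 h2
    rw [PySem.Dict.contains_iff_mem_keys, hzkeys]
    exact (PySem.List.mem_pyRange_one).mpr ⟨h1, h2⟩
  obtain ⟨hk, hg⟩ := pv_overlay n poses zeros hzc
  set F := poses.foldl (fun d p => if 0 ≤ p ∧ p < n then d.insert p 1 else d) zeros with hF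
  have hFnodup : F.keys.Nodup := by rw [hk]; exact hznodup
  have hFitems : F.items = F.keys.map (fun k => (k, F.getD k 0)) :=
    PySem.Dict.items_eq_map_keys F hFnodup 0
  rw [pv_items_range n (fun i => if poses.contains i then (1:Int) else 0), hFitems, hk, hzkeys]
  apply List.map_congr_left
  intro i hi
  obtain ⟨h1, h2⟩ := (PySem.List.mem_pyRange_one).mp hi
  have hget0 : zeros.get? i = some 0 := by
    exact PySem.Dict.get?_of_mem_items zeros
      (by rw [hzitems]; exact List.mem_map.mpr ⟨i, hi, rfl⟩) hznodup
  rw [PySem.Dict.getD_eq_get?_getD, hg i]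
  by_cases hmem : i ∈ poses
  · simp [hmem, h1, h2]
  · simp [hmem, hget0]
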